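-- pv_equiv track=rewrite | github.com/Alpha-Agents/alpha-agents-task-executer | trading_view_extension/utils/sheet_utils.py | find_assistants_prompts
-- ===== SOURCE A (Python) =====
-- def find_assistants_prompts(requested_titles, assistants_data):
--     """
--     Match requested assistant titles with their corresponding prompts.
--
--     Args:
--         requested_titles (list of str): List of assistant titles to match.
--         assistants_data (list of list): Data read from the "Assistants" sheet
--             where row structure is [assistant_id, title, prompt].
--
--     Returns:
--         list of str: List of prompts matching the requested titles.
--     """
--     title_to_prompt = {row[1]: row[2] for row in assistants_data if len(row) >= 3}
--
--     requested_prompts = []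
--     for title in requested_titles:  # No need for titles_group[0]
--         stripped_title = title.strip()
--         if stripped_title in title_to_prompt:
--             requested_prompts.append(title_to_prompt[stripped_title])
--     return requested_prompts
-- ===== SOURCE B (Python) =====
-- def find_assistants_prompts(requested_titles, assistants_data):
--     """Loop-inverted re-implementation: set up one slot per requested title,
--     then make a single sweep over assistants_data, overwriting every matching
--     slot (so the last well-formed matching row wins), and finally collect the
--     filled slots in requested order."""
--     slots = [[title.strip(), None] for title in requested_titles]
--     for row in assistants_data:
--         if len(row) >= 3:
--             for slot in slots:
--                 if slot[0] == row[1]: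
--                     slot[1] = row[2]
--     return [prompt for _, prompt in slots if prompt is not None]
-- ===== Notes on version B (the rewrite author's own statement) =====
-- stated objective: alternative
-- what changed: Inverted the loop structure: instead of building a title-to-prompt dict and looking titles up, B allocates one slot per requested title and makes a single sweep over assistants_data overwriting matching slots (last row wins), then collects filled slots.
import Mathlib
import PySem

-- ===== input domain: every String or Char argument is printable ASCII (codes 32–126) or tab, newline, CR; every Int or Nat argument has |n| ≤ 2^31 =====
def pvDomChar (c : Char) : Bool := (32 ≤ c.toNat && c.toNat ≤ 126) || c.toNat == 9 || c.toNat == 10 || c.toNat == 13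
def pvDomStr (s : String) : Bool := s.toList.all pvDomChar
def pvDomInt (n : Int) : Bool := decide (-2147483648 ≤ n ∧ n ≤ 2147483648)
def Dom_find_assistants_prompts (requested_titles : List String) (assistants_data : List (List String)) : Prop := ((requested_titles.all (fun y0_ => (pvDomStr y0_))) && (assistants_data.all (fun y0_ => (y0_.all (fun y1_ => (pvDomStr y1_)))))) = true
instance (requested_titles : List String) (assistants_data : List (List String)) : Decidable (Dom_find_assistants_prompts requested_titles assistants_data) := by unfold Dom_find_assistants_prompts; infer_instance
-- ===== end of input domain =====

-- B inverts the loop structure: one slot per requested title, a single sweep over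
-- assistants_data overwriting matching slots, then collect (objective: alternative).

-- ===== PORT A =====
def find_assistants_prompts (requested_titles : List String) (assistants_data : List (List String)) : List String :=
  -- {row[1]: row[2] for row in assistants_data if len(row) >= 3}
  let title_to_prompt : PySem.Dict String String :=
    assistants_data.foldl (fun d row =>
      if 3 ≤ row.length then
        match PySem.List.pyGet? row 1, PySem.List.pyGet? row 2 with
        | some t, some p => d.insert t p
        | _, _ => d          -- unreachable when len(row) >= 3
      else d) PySem.Dict.empty
  requested_titles.foldl (fun acc title =>
    let stripped := PySem.Str.strip title
    match title_to_prompt.get? stripped with   -- 'stripped in dict' then 'dict[stripped]'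
    | some p => acc ++ [p]
    | none => acc) []

-- ===== PORT B =====
-- slots = [[title.strip(), None] for title in requested_titles]
-- for row in assistants_data: if len(row) >= 3: for slot in slots: overwrite on match
-- return [prompt for _, prompt in slots if prompt is not None]
def find_assistants_prompts_alt (requested_titles : List String) (assistants_data : List (List String)) : List String :=
  let slots0 : List (String × Option String) :=
    requested_titles.map (fun title => (PySem.Str.strip title, none))
  let slots :=
    assistants_data.foldl (fun slots row =>
      if 3 ≤ row.length then
        slots.map (fun slot =>
          if some slot.1 = PySem.List.pyGet? row 1 then (slot.1, PySem.List.pyGet? row 2)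
          else slot)
      else slots) slots0
  slots.filterMap (fun slot => slot.2)

-- ===== PRECONDITION & SPEC =====
def Spec_find_assistants_prompts (requested_titles : List String) (assistants_data : List (List String)) (out : List String) : Prop := out = find_assistants_prompts_alt requested_titles assistants_data
instance (requested_titles : List String) (assistants_data : List (List String)) (out : List String) : Decidable (Spec_find_assistants_prompts requested_titles assistants_data out) := by unfold Spec_find_assistants_prompts; infer_instance

-- ===== CLAIM (what is proved, stated in full; the proofs are below) =====
def Claim_equal_find_assistants_prompts : Prop := ∀ (requested_titles : List String) (assistants_data : List (List String)), Dom_find_assistants_prompts requested_titles assistants_data → Spec_find_assistants_prompts requested_titles assistants_data (find_assistants_prompts requested_titles assistants_data)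

-- ===== LEMMAS AND PROOFS =====

-- per-slot effect of one data row
def pvSlotStep (row : List String) (s : String × Option String) : String × Option String :=
  if 3 ≤ row.length then
    (if some s.1 = PySem.List.pyGet? row 1 then (s.1, PySem.List.pyGet? row 2) else s)
  else s

-- B's sweep acts on each slot independently
lemma slots_fold (rows : List (List String)) :
    ∀ init : List (String × Option String),
      rows.foldl (fun slots row =>
        if 3 ≤ row.length then
          slots.map (fun slot =>
            if some slot.1 = PySem.List.pyGet? row 1 then (slot.1, PySem.List.pyGet? row 2)
            else slot)
        else slots) init
      = init.map (fun s => rows.foldl (fun a r => pvSlotStep r a) s) := by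
  induction rows with
  | nil => intro init; simp
  | cons row rest ih =>
    intro init
    simp only [List.foldl_cons]
    have hstep : (if 3 ≤ row.length then
        init.map (fun slot =>
          if some slot.1 = PySem.List.pyGet? row 1 then (slot.1, PySem.List.pyGet? row 2)
          else slot)
      else init) = init.map (pvSlotStep row) := by
      by_cases h : 3 ≤ row.length
      · rw [if_pos h]
        refine List.map_congr_left (fun s _ => ?_)
        simp [pvSlotStep, h]
      · rw [if_neg h]
        conv_lhs => rw [← List.map_id init]
        refine List.map_congr_left (fun s _ => ?_)
        simp [pvSlotStep, h]
    rw [hstep, ih, List.map_map]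
    rfl

-- folding pvSlotStep keeps the title and computes the last matching prompt
lemma slotStep_fold (t : String) (rows : List (List String)) :
    ∀ acc : Option String,
      rows.foldl (fun a r => pvSlotStep r a) (t, acc)
      = (t, rows.foldl (fun a r =>
          if 3 ≤ r.length then
            if some t = PySem.List.pyGet? r 1 then PySem.List.pyGet? r 2 else a
          else a) acc) := by
  induction rows with
  | nil => intro acc; rfl
  | cons row rest ih =>
    intro acc
    simp only [List.foldl_cons]
    by_cases h : 3 ≤ row.length
    · by_cases hm : some t = PySem.List.pyGet? row 1
      · have e1 : pvSlotStep row (t, acc) = (t, PySem.List.pyGet? row 2) := by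
          simp [pvSlotStep, h, hm]
        rw [e1, ih, if_pos h, if_pos hm]
      · have e1 : pvSlotStep row (t, acc) = (t, acc) := by
          simp [pvSlotStep, h, hm]
        rw [e1, ih, if_pos h, if_neg hm]
    · have e1 : pvSlotStep row (t, acc) = (t, acc) := by
        simp [pvSlotStep, h]
      rw [e1, ih, if_neg h]

-- A's append-loop is a filterMap
lemma foldl_append_filterMap (f : String → Option String) (l : List String) :
    ∀ acc : List String,
      l.foldl (fun acc t => match f t with | some p => acc ++ [p] | none => acc) acc
      = acc ++ l.filterMap f := by
  induction l with
  | nil => intro acc; simp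
  | cons x xs ih =>
    intro acc
    simp only [List.foldl_cons, List.filterMap_cons]
    cases hx : f x with
    | none => simp [ih]
    | some p => simp [ih]

-- A's dict answers get? t with exactly the last-match scan
lemma dict_get_eq_last (t : String) (rows : List (List String)) :
    ∀ d : PySem.Dict String String,
      (rows.foldl (fun d row =>
        if 3 ≤ row.length then
          match PySem.List.pyGet? row 1, PySem.List.pyGet? row 2 with
          | some a, some p => d.insert a p
          | _, _ => d
        else d) d).get? t
      = rows.foldl (fun acc row =>
          if 3 ≤ row.length then
            if some t = PySem.List.pyGet? row 1 then PySem.List.pyGet? row 2 else acc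
          else acc) (d.get? t) := by
  induction rows with
  | nil => intro d; rfl
  | cons row rest ih =>
    intro d
    simp only [List.foldl_cons]
    by_cases h : 3 ≤ row.length
    · have h1 : PySem.List.pyGet? row 1 = some row[1] :=
        PySem.List.pyGet?_ofNat row 1 (by omega)
      have h2 : PySem.List.pyGet? row 2 = some row[2] :=
        PySem.List.pyGet?_ofNat row 2 (by omega)
      rw [if_pos h, if_pos h, h1, h2]
      rw [ih]
      by_cases ht : row[1] = t
      · subst ht
        rw [if_pos rfl, PySem.Dict.get?_insert_self]
      · rw [if_neg (by simpa using fun hh : t = row[1] => ht hh.symm)]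
        rw [PySem.Dict.get?_insert_of_ne (hne := Ne.symm ht)]
    · rw [if_neg h, if_neg h, ih]

-- ===== VERDICT (by name: the statement is the Claim_ definition above) =====
theorem find_assistants_prompts_spec : Claim_equal_find_assistants_prompts := by
  intro requested_titles assistants_data _
  unfold Spec_find_assistants_prompts find_assistants_prompts find_assistants_prompts_alt
  simp only []
  rw [slots_fold, List.map_map]
  have hslot : ∀ title : String,
      (fun s => assistants_data.foldl (fun a r => pvSlotStep r a) s)
        ((fun title => (PySem.Str.strip title, (none : Option String))) title)
      = (PySem.Str.strip title,
          assistants_data.foldl (fun a r =>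
            if 3 ≤ r.length then
              if some (PySem.Str.strip title) = PySem.List.pyGet? r 1 then PySem.List.pyGet? r 2 else a
            else a) none) := fun title => slotStep_fold _ _ _
  simp only [Function.comp_def]
  rw [List.map_congr_left (fun t _ => hslot t)]
  rw [foldl_append_filterMap
    (f := fun title => (assistants_data.foldl (fun d row =>
      if 3 ≤ row.length then
        match PySem.List.pyGet? row 1, PySem.List.pyGet? row 2 with
        | some a, some p => d.insert a p
        | _, _ => d
      else d) PySem.Dict.empty).get? (PySem.Str.strip title))]
  simp only [List.nil_append, List.filterMap_map, Function.comp]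
  congr 1
  funext title
  simp only [dict_get_eq_last, PySem.Dict.get?_empty]
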